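-- pv_equiv track=rewrite | github.com/duchesneaumathieu/radbm | radbm/search/superset/priority_superset_trie_search.py | limitrophes_suffix
-- ===== SOURCE A (Python) =====
-- def limitrophes_suffix(suffix, prefix):
--     #find what prevents suffix to be a subset of a node in the sub-trie of prefix.
--     limit = ()
--     while True:
--         if not suffix or not prefix:
--             return limit
--         elif suffix[0] < prefix[0]:
--             limit += (suffix[0],)
--             suffix = suffix[1:]
--         elif suffix[0] == prefix[0]:
--             suffix = suffix[1:]
--             prefix = prefix[1:]
--         elif suffix[0] > prefix[0]:
--             #this cannot happen in PrioritySupersetTrieSearch._itersearch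
--             #since prefix is the branch and while never contain element not in suffix
--             prefix = prefix[1:]
-- ===== SOURCE B (Python) =====
-- def limitrophes_suffix(suffix, prefix):
--     # Two index pointers, one pass, no tuple slicing/concatenation.
--     i, j, n, m = 0, 0, len(suffix), len(prefix)
--     out = []
--     while i < n and j < m:
--         a, b = suffix[i], prefix[j]
--         if a < b:
--             out.append(a)
--             i += 1
--         elif a == b:
--             i += 1
--             j += 1
--         else:
--             j += 1
--     return tuple(out)
-- ===== Notes on version B (the rewrite author's own statement) =====
-- stated objective: faster
-- what changed: Replaces the tuple-slicing merge loop (each step copies suffix/prefix/limit tuples) with a single pass using two index pointers and a list accumulator.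
import Mathlib
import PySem

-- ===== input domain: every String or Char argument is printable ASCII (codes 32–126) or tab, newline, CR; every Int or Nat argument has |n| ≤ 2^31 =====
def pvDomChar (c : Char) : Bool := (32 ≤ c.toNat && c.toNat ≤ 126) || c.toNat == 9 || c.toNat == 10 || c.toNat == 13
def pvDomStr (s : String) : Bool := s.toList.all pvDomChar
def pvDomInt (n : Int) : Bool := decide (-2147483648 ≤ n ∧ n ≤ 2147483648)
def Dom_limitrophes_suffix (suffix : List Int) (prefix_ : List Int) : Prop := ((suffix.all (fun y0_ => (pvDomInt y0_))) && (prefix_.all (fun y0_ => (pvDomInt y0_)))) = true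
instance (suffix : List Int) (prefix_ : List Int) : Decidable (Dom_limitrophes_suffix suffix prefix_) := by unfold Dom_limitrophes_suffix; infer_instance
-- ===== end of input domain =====

-- B replaces A's tuple-slicing merge loop with a single two-index-pointer pass (objective: faster).


-- ===== PORT A =====
-- while-True loop: state (limit, suffix, prefix); slicing becomes head/tail matching.
def limitrophesA (limit : List Int) (s p : List Int) : List Int :=
  match s, p with
  | [], _ => limit
  | _ :: _, [] => limit
  | a :: s', b :: p' =>
    if a < b then limitrophesA (limit ++ [a]) s' (b :: p')
    else if a = b then limitrophesA limit s' p'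
    else limitrophesA limit (a :: s') p'
termination_by s.length + p.length
decreasing_by all_goals simp_all <;> omega

def limitrophes_suffix (suffix : List Int) (prefix_ : List Int) : List Int :=
  limitrophesA [] suffix prefix_

-- ===== PORT B =====
-- while i < n and j < m: in-range indexing (getD with dummy default, always in range).
def limitrophesB (suffix prefix_ : List Int) (i j : Nat) (out : List Int) : List Int :=
  if _h : i < suffix.length ∧ j < prefix_.length then
    let a := suffix.getD i 0
    let b := prefix_.getD j 0
    if a < b then limitrophesB suffix prefix_ (i+1) j (out ++ [a])
    else if a = b then limitrophesB suffix prefix_ (i+1) (j+1) out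
    else limitrophesB suffix prefix_ i (j+1) out
  else out
termination_by (suffix.length - i) + (prefix_.length - j)
decreasing_by all_goals omega

def limitrophes_suffix_alt (suffix : List Int) (prefix_ : List Int) : List Int :=
  limitrophesB suffix prefix_ 0 0 []

-- ===== PRECONDITION & SPEC =====
def Spec_limitrophes_suffix (suffix : List Int) (prefix_ : List Int) (out : List Int) : Prop := out = limitrophes_suffix_alt suffix prefix_
instance (suffix : List Int) (prefix_ : List Int) (out : List Int) : Decidable (Spec_limitrophes_suffix suffix prefix_ out) := by unfold Spec_limitrophes_suffix; infer_instance

-- ===== CLAIM (what is proved, stated in full; the proofs are below) =====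
def Claim_equal_limitrophes_suffix : Prop := ∀ (suffix : List Int) (prefix_ : List Int), Dom_limitrophes_suffix suffix prefix_ → Spec_limitrophes_suffix suffix prefix_ (limitrophes_suffix suffix prefix_)

-- ===== LEMMAS AND PROOFS =====
theorem drop_getD_cons {l : List Int} {i : Nat} (h : i < l.length) :
    l.drop i = l.getD i 0 :: l.drop (i+1) := by
  rw [List.drop_eq_getElem_cons h, List.getD_eq_getElem]

theorem limitrophesB_eq_A (suffix prefix_ : List Int) (i j : Nat) (out : List Int) :
    limitrophesB suffix prefix_ i j out = limitrophesA out (suffix.drop i) (prefix_.drop j) := by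
  induction i, j, out using limitrophesB.induct (suffix := suffix) (prefix_ := prefix_) with
  | case1 i j out h a b hlt ih =>
    rw [limitrophesB]
    simp only [dif_pos h]
    rw [drop_getD_cons h.1, drop_getD_cons h.2, limitrophesA]
    have hlt' : suffix.getD i 0 < prefix_.getD j 0 := hlt
    simp only [if_pos hlt']
    rw [drop_getD_cons h.2] at ih
    exact ih
  | case2 i j out h a b hlt heq ih =>
    rw [limitrophesB]
    simp only [dif_pos h]
    rw [drop_getD_cons h.1, drop_getD_cons h.2, limitrophesA]
    have hlt' : ¬ suffix.getD i 0 < prefix_.getD j 0 := hlt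
    have heq' : suffix.getD i 0 = prefix_.getD j 0 := heq
    simp only [if_neg hlt', if_pos heq']
    exact ih
  | case3 i j out h a b hlt heq ih =>
    rw [limitrophesB]
    simp only [dif_pos h]
    rw [drop_getD_cons h.1, drop_getD_cons h.2, limitrophesA]
    have hlt' : ¬ suffix.getD i 0 < prefix_.getD j 0 := hlt
    have heq' : ¬ suffix.getD i 0 = prefix_.getD j 0 := heq
    simp only [if_neg hlt', if_neg heq']
    rw [drop_getD_cons h.1] at ih
    exact ih
  | case4 i j out h =>
    rw [limitrophesB, dif_neg h]
    rcases Nat.lt_or_ge i suffix.length with hi | hi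
    · have hj : prefix_.length ≤ j := by omega
      rw [List.drop_eq_nil_of_le hj, drop_getD_cons hi, limitrophesA]
    · rw [List.drop_eq_nil_of_le hi, limitrophesA]

-- ===== VERDICT (by name: the statement is the Claim_ definition above) =====
theorem limitrophes_suffix_spec : Claim_equal_limitrophes_suffix := by
  intro suffix prefix_ _
  unfold Spec_limitrophes_suffix limitrophes_suffix limitrophes_suffix_alt
  rw [limitrophesB_eq_A]
  simp
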